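-- pv_equiv track=rewrite | github.com/avilamowski/hyper_jade | ejemplos/ej1-2025-s1-r2/alumn_18.py | toda_palabra
-- ===== SOURCE A (Python) =====
-- def es_numero(caracter):
--     if "0" <= caracter <= "9":
--         return True
--     else:
--         return False
--
-- def split(texto, separador=" "):
--     resultado = []
--     palabra = ""
--     for char in texto:
--         if char == separador:
--             if palabra:
--                 resultado.append(palabra)
--                 palabra = ""
--         else:
--             palabra += char
--     if palabra:
--         resultado.append(palabra)
--     return resultado
--
-- def toda_palabra(texto):
--     todas = []
--     lineas = split(texto, "\n")
--     for i in range(len(lineas)):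
--         palabras = split(lineas[i], " ")
--         for j in range(len(palabras)):
--             palabra = palabras[j]
--             palabra = palabras[j]
--             number = True
--             for caracter in palabra:
--                 if not es_numero(caracter):
--                     number = False
--             if not number and palabra != "":
--                 if palabra not in todas:
--                     todas.append(palabra)
--     return todas
-- ===== SOURCE B (Python) =====
-- def toda_palabra(texto):
--     res = []
--     word = ""
--     all_digit = True
--     for c in texto:
--         if c == " " or c == "\n":
--             if word and not all_digit and word not in res:
--                 res.append(word)
--             word = ""
--             all_digit = True
--         else:
--             word += c
--             all_digit = all_digit and ("0" <= c <= "9")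
--     if word and not all_digit and word not in res:
--         res.append(word)
--     return res
-- ===== Notes on version B (the rewrite author's own statement) =====
-- stated objective: faster
-- what changed: Replaced the two nested hand-written splits (newline then space) plus a per-word digit rescan with a single left-to-right pass over the characters that maintains the current word and an all-digit flag, flushing at separators.
import Mathlib
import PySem

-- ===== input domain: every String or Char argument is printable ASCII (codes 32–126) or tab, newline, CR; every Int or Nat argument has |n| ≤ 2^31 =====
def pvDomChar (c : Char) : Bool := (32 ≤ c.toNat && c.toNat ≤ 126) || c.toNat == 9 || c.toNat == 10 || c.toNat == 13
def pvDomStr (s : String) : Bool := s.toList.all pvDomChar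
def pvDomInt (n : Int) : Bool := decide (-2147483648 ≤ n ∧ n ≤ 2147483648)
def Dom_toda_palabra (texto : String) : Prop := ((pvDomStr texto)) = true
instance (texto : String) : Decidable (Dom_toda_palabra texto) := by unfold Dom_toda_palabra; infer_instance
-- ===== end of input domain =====

-- B replaces A's two nested hand-written splits + per-word digit rescan by one
-- left-to-right character pass carrying the current word and an all-digit flag.

-- ===== PORT A =====
def es_numero (c : Char) : Bool := decide ('0' ≤ c ∧ c ≤ '9')

-- A's hand-written split: loop over the chars with state (resultado, palabra)
def splitGo (sep : Char) : List Char → List (List Char) → List Char → List (List Char)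
  | [], res, w => if w ≠ [] then res ++ [w] else res
  | c :: cs, res, w =>
    if c = sep then
      (if w ≠ [] then splitGo sep cs (res ++ [w]) [] else splitGo sep cs res w)
    else splitGo sep cs res (w ++ [c])

def splitP (t : List Char) (sep : Char) : List (List Char) := splitGo sep t [] []

-- A's inner-loop body: digit scan over the word, then the membership test
def addWord (todas : List (List Char)) (p : List Char) : List (List Char) :=
  let number := p.foldl (fun n c => if es_numero c then n else false) true
  if number = false ∧ p ≠ [] then
    (if p ∈ todas then todas else todas ++ [p])
  else todas

def toda_palabra (texto : String) : List String :=
  ((splitP texto.toList '\n').foldl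
    (fun todas linea => (splitP linea ' ').foldl addWord todas) []).map (fun l => String.ofList l)

-- ===== PORT B =====
def flushB (res : List (List Char)) (w : List Char) (ad : Bool) : List (List Char) :=
  if w ≠ [] ∧ ad = false ∧ w ∉ res then res ++ [w] else res

def goB : List Char → List (List Char) → List Char → Bool → List (List Char)
  | [], res, w, ad => flushB res w ad
  | c :: cs, res, w, ad =>
    if c = ' ' ∨ c = '\n' then goB cs (flushB res w ad) [] true
    else goB cs res (w ++ [c]) (ad && decide ('0' ≤ c ∧ c ≤ '9'))

def toda_palabra_alt (texto : String) : List String :=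
  (goB texto.toList [] [] true).map (fun l => String.ofList l)

-- ===== PRECONDITION & SPEC =====
def Spec_toda_palabra (texto : String) (out : List String) : Prop := out = toda_palabra_alt texto
instance (texto : String) (out : List String) : Decidable (Spec_toda_palabra texto out) := by unfold Spec_toda_palabra; infer_instance

-- ===== CLAIM (what is proved, stated in full; the proofs are below) =====
def Claim_equal_toda_palabra : Prop := ∀ (texto : String), Dom_toda_palabra texto → Spec_toda_palabra texto (toda_palabra texto)

-- ===== LEMMAS AND PROOFS =====

-- common intermediate: single pass with explicit word buffer and A-style addWord
def proc : List Char → List Char → List (List Char) → List (List Char)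
  | [], w, acc => addWord acc w
  | c :: cs, w, acc =>
    if c = ' ' ∨ c = '\n' then proc cs [] (addWord acc w) else proc cs (w ++ [c]) acc

def numFold (w : List Char) : Bool := w.foldl (fun n c => if es_numero c then n else false) true

theorem addWord_nil (acc : List (List Char)) : addWord acc [] = acc := by
  simp [addWord, List.foldl]

theorem numFold_snoc (w : List Char) (c : Char) :
    numFold (w ++ [c]) = (numFold w && es_numero c) := by
  simp only [numFold, List.foldl_append, List.foldl]
  cases numFold w <;> cases h : es_numero c <;> simp [h]

theorem flushB_eq (acc : List (List Char)) (w : List Char) :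
    flushB acc w (numFold w) = addWord acc w := by
  by_cases h1 : w = [] <;> by_cases h2 : numFold w = false <;>
    by_cases h3 : w ∈ acc <;> simp [flushB, addWord, numFold] at * <;> simp [*]

theorem splitGo_res (sep : Char) :
    ∀ (cs : List Char) (res : List (List Char)) (w : List Char),
      splitGo sep cs res w = res ++ splitGo sep cs [] w := by
  intro cs
  induction cs with
  | nil => intro res w; by_cases h : w = [] <;> simp [splitGo, h]
  | cons c cs ih =>
    intro res w
    by_cases hc : c = sep
    · subst hc
      by_cases h : w = []
      · subst h; simpa [splitGo] using ih res []
      · simp [splitGo, h, ih (res ++ [w]) [], ih [w] []]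
    · simp only [splitGo, if_neg hc]
      exact ih res (w ++ [c])

-- how A consumes one line, expressed as a fold over the line's chars
def lineStep (p : List (List Char) × List Char) (c : Char) : List (List Char) × List Char :=
  if c = ' ' then (addWord p.1 p.2, []) else (p.1, p.2 ++ [c])

theorem lineG :
    ∀ (wL wW : List Char) (acc : List (List Char)),
      (splitGo ' ' wL [] wW).foldl addWord acc
        = addWord (wL.foldl lineStep (acc, wW)).1 (wL.foldl lineStep (acc, wW)).2 := by
  intro wL
  induction wL with
  | nil =>
    intro wW acc
    by_cases h : wW = [] <;> simp [splitGo, h, addWord_nil, List.foldl]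
  | cons c cs ih =>
    intro wW acc
    by_cases hc : c = ' '
    · subst hc
      by_cases h : wW = []
      · simp [splitGo, h, List.foldl, lineStep, addWord_nil, ih]
      · rw [show splitGo ' ' (' ' :: cs) [] wW = [wW] ++ splitGo ' ' cs [] [] from by
          simp [splitGo, h, splitGo_res ' ' cs [wW] []]]
        simp only [List.foldl_append, List.foldl_cons, List.foldl_nil]
        simpa [lineStep] using ih [] (addWord acc wW)
    · simp [splitGo, hc, List.foldl, lineStep, ih]

def lineFold (acc : List (List Char)) (l : List Char) : List (List Char) :=
  (splitGo ' ' l [] []).foldl addWord acc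

theorem A_to_proc :
    ∀ (cs wL : List Char) (acc : List (List Char)),
      (splitGo '\n' cs [] wL).foldl lineFold acc
        = proc cs (wL.foldl lineStep (acc, [])).2 (wL.foldl lineStep (acc, [])).1 := by
  intro cs
  induction cs with
  | nil =>
    intro wL acc
    by_cases h : wL = []
    · simp [splitGo, h, proc, addWord_nil]
    · simp only [splitGo, if_pos h]
      simpa [lineFold] using lineG wL [] acc
  | cons c cs ih =>
    intro wL acc
    by_cases hn : c = '\n'
    · subst hn
      have hline : lineFold acc wL
          = addWord (wL.foldl lineStep (acc, [])).1 (wL.foldl lineStep (acc, [])).2 := by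
        simpa [lineFold] using lineG wL [] acc
      by_cases h : wL = []
      · simp [splitGo, h, proc, List.foldl, addWord_nil, ih]
      · rw [show splitGo '\n' ('\n' :: cs) [] wL = [wL] ++ splitGo '\n' cs [] [] from by
          simp [splitGo, h, splitGo_res '\n' cs [wL] []]]
        simp only [List.foldl_append, List.foldl_cons, List.foldl_nil]
        rw [ih [] (lineFold acc wL)]
        simp [proc, List.foldl, hline]
    · have hstep : (wL ++ [c]).foldl lineStep (acc, []) =
          lineStep (wL.foldl lineStep (acc, [])) c := by
        simp [List.foldl_append]
      by_cases hs : c = ' '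
      · simp only [splitGo, if_neg hn]
        rw [ih (wL ++ [c]) acc, hstep]
        simp [proc, hs, lineStep]
      · simp only [splitGo, if_neg hn]
        rw [ih (wL ++ [c]) acc, hstep]
        simp [proc, hs, hn, lineStep]

theorem B_to_proc :
    ∀ (cs w : List Char) (ad : Bool) (acc : List (List Char)),
      ad = numFold w → goB cs acc w ad = proc cs w acc := by
  intro cs
  induction cs with
  | nil => intro w ad acc h; simp [goB, proc, h, flushB_eq]
  | cons c cs ih =>
    intro w ad acc h
    by_cases hc : c = ' ' ∨ c = '\n'
    · simp only [goB, proc, if_pos hc]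
      rw [h, flushB_eq]
      exact ih [] true (addWord acc w) rfl
    · simp only [goB, proc, if_neg hc]
      apply ih
      rw [h, numFold_snoc, es_numero]

-- ===== VERDICT (by name: the statement is the Claim_ definition above) =====
theorem toda_palabra_spec : Claim_equal_toda_palabra := by
  intro texto _
  unfold Spec_toda_palabra toda_palabra toda_palabra_alt splitP
  rw [B_to_proc texto.toList [] true [] rfl]
  rw [show (fun todas linea => (splitGo ' ' linea [] []).foldl addWord todas) = lineFold from rfl]
  rw [A_to_proc texto.toList [] []]
  simp [List.foldl]
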